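-- pv_equiv track=rewrite | github.com/thepratholic/Competitive-Programming | LeetCode/Biweekly contest 162/Earliest Finish Time for Land and Water Rides I.py | earliestFinishTime
-- ===== SOURCE A (Python) =====
-- from typing import List
--
-- def earliestFinishTime(landStartTime: List[int], landDuration: List[int], waterStartTime: List[int], waterDuration: List[int]) -> int:
--
--     ans = float('inf')
--
--     landRide = []
--
--     for i in range(len(landStartTime)):
--         landRide.append((landStartTime[i], landDuration[i]))
--
--     waterRide = []
--
--     for i in range(len(waterStartTime)):
--         waterRide.append((waterStartTime[i], waterDuration[i]))
--
--     landRide.sort(key = lambda x : x[0])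
--     waterRide.sort(key = lambda x : x[0])
--
--     for l in landRide:
--         for w in waterRide:
--             end_land = l[0] + l[1]
--             water_start = max(end_land, w[0])
--             water_end = water_start + w[1]
--             ans = min(ans, water_end)
--
--
--             # case 2
--             end_water = w[0] + w[1]
--             start_land = max(end_water, l[0])
--             end_land = start_land + l[1]
--             ans = min(ans, end_land)
--
--     return ans
-- ===== SOURCE B (Python) =====
-- from typing import List
--
-- def earliestFinishTime(landStartTime: List[int], landDuration: List[int], waterStartTime: List[int], waterDuration: List[int]) -> int:
--     # O(n+m): the best "land then water" plan uses the land ride with the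
--     # smallest end time, and symmetrically for "water then land".
--     land_end = min(s + d for s, d in zip(landStartTime, landDuration))
--     water_end = min(s + d for s, d in zip(waterStartTime, waterDuration))
--     land_then_water = min(max(land_end, s) + d for s, d in zip(waterStartTime, waterDuration))
--     water_then_land = min(max(water_end, s) + d for s, d in zip(landStartTime, landDuration))
--     return min(land_then_water, water_then_land)
-- ===== Notes on version B (the rewrite author's own statement) =====
-- stated objective: faster
-- what changed: Replaces the sort plus nested O(n*m) loop over all land/water pairs by precomputing the minimum land end time and minimum water end time and doing one linear pass over each list.
-- outside the precondition, e.g. on earliestFinishTime([], [], [1], [1]): A returns inf, B raises ValueError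
import Mathlib
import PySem

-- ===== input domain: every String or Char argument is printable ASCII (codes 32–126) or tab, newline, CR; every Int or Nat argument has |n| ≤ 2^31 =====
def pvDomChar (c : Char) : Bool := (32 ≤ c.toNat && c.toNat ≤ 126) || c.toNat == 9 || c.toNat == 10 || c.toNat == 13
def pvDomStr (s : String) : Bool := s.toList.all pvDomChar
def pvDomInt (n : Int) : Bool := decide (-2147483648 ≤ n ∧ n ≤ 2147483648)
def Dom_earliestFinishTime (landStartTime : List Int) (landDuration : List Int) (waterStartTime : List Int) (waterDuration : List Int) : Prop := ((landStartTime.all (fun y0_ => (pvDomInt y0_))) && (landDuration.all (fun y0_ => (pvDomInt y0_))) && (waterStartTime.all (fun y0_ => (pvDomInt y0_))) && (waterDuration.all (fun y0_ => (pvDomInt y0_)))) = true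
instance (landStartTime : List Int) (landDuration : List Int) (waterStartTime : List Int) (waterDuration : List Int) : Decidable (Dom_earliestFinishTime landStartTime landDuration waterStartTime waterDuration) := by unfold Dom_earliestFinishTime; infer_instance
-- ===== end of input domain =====

-- B replaces A's sort + nested loop over all land/water pairs by precomputed
-- minimum end times and one linear pass over each list (asymptotically faster).

-- ===== PORT A =====
-- 'ans = float(inf); ans = min(ans, v)': inf modeled as none (under Pre_ both lists are nonempty, so the returned ans is never inf)
def pvMinI (o : Option Int) (v : Int) : Option Int :=
  match o with
  | none => some v
  | some a => some (min a v)

def earliestFinishTime (landStartTime : List Int) (landDuration : List Int) (waterStartTime : List Int) (waterDuration : List Int) : Int :=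
  let landRide := (PySem.List.pyRange 0 (PySem.List.len landStartTime) 1).foldl
    (fun acc i => acc ++ [(PySem.List.pyGetD landStartTime i 0, PySem.List.pyGetD landDuration i 0)]) []
  let waterRide := (PySem.List.pyRange 0 (PySem.List.len waterStartTime) 1).foldl
    (fun acc i => acc ++ [(PySem.List.pyGetD waterStartTime i 0, PySem.List.pyGetD waterDuration i 0)]) []
  let landS := PySem.List.sorted landRide (fun x => x.1) false
  let waterS := PySem.List.sorted waterRide (fun x => x.1) false
  let ans := landS.foldl (fun ans l =>
    waterS.foldl (fun ans w =>
      let endLand := l.1 + l.2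
      let waterStart := max endLand w.1
      let waterEnd := waterStart + w.2
      let ans := pvMinI ans waterEnd
      let endWater := w.1 + w.2
      let startLand := max endWater l.1
      let endLand2 := startLand + l.2
      pvMinI ans endLand2) ans) (none : Option Int)
  ans.getD 0

-- ===== PORT B =====
-- min(nonempty list of ints); Pre_ guarantees nonemptiness
def pvMinNE (xs : List Int) : Int := (PySem.List.min? xs (fun x => x)).getD 0

def earliestFinishTime_alt (landStartTime : List Int) (landDuration : List Int) (waterStartTime : List Int) (waterDuration : List Int) : Int :=
  let landEnd := pvMinNE ((landStartTime.zip landDuration).map (fun p => p.1 + p.2))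
  let waterEnd := pvMinNE ((waterStartTime.zip waterDuration).map (fun p => p.1 + p.2))
  let landThenWater := pvMinNE ((waterStartTime.zip waterDuration).map (fun p => max landEnd p.1 + p.2))
  let waterThenLand := pvMinNE ((landStartTime.zip landDuration).map (fun p => max waterEnd p.1 + p.2))
  min landThenWater waterThenLand

-- ===== PRECONDITION & SPEC =====
-- Pre_ excludes (a) empty ride lists, where A returns float('inf') — not an int — and B raises ValueError,
-- and (b) a start list longer than its duration list, where A raises IndexError.
def Pre_earliestFinishTime (landStartTime : List Int) (landDuration : List Int) (waterStartTime : List Int) (waterDuration : List Int) : Prop :=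
  landStartTime ≠ [] ∧ waterStartTime ≠ [] ∧
  landStartTime.length ≤ landDuration.length ∧ waterStartTime.length ≤ waterDuration.length
instance (landStartTime : List Int) (landDuration : List Int) (waterStartTime : List Int) (waterDuration : List Int) : Decidable (Pre_earliestFinishTime landStartTime landDuration waterStartTime waterDuration) := by unfold Pre_earliestFinishTime; infer_instance

def pvWitness_earliestFinishTime : List Int × List Int × List Int × List Int := ([2, 8], [4, 1], [10, 3], [4, 2])

def Spec_earliestFinishTime (landStartTime : List Int) (landDuration : List Int) (waterStartTime : List Int) (waterDuration : List Int) (out : Int) : Prop := out = earliestFinishTime_alt landStartTime landDuration waterStartTime waterDuration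
instance (landStartTime : List Int) (landDuration : List Int) (waterStartTime : List Int) (waterDuration : List Int) (out : Int) : Decidable (Spec_earliestFinishTime landStartTime landDuration waterStartTime waterDuration out) := by unfold Spec_earliestFinishTime; infer_instance

-- ===== CLAIM (what is proved, stated in full; the proofs are below) =====
def Claim_equal_earliestFinishTime : Prop := ∀ (landStartTime : List Int) (landDuration : List Int) (waterStartTime : List Int) (waterDuration : List Int), Dom_earliestFinishTime landStartTime landDuration waterStartTime waterDuration → Pre_earliestFinishTime landStartTime landDuration waterStartTime waterDuration → Spec_earliestFinishTime landStartTime landDuration waterStartTime waterDuration (earliestFinishTime landStartTime landDuration waterStartTime waterDuration)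

-- ===== LEMMAS AND PROOFS =====

-- min on Option Int with none = +infinity
def pvOMin (a b : Option Int) : Option Int :=
  match a, b with
  | none, b => b
  | some a, none => some a
  | some a, some b => some (min a b)

theorem pvOMin_none_right (a : Option Int) : pvOMin a none = a := by cases a <;> rfl

theorem pvOMin_four (a b c d : Option Int) :
    pvOMin (pvOMin a b) (pvOMin c d) = pvOMin (pvOMin a c) (pvOMin b d) := by
  cases a <;> cases b <;> cases c <;> cases d <;> simp only [pvOMin, Option.some.injEq] <;> omega

theorem pvOMin_rc (a b c : Option Int) :
    pvOMin (pvOMin a b) c = pvOMin (pvOMin a c) b := by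
  cases a <;> cases b <;> cases c <;> simp only [pvOMin, Option.some.injEq] <;> omega

-- minimum of a list of options (none = +infinity)
def pvOList (os : List (Option Int)) : Option Int := os.foldl pvOMin none

theorem pvOList_shift (os : List (Option Int)) : ∀ a : Option Int,
    os.foldl pvOMin a = pvOMin a (pvOList os) := by
  induction os with
  | nil => intro a; simp [pvOList, List.foldl_nil, pvOMin_none_right]
  | cons o os ih =>
    intro a
    simp only [pvOList, List.foldl_cons] at *
    rw [ih (pvOMin a o), ih (pvOMin none o)]
    cases a <;> cases o <;> cases os.foldl pvOMin none <;> (simp only [pvOMin, Option.some.injEq]; try omega)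

theorem pvOList_cons (o : Option Int) (os : List (Option Int)) :
    pvOList (o :: os) = pvOMin o (pvOList os) := by
  simp only [pvOList, List.foldl_cons]
  rw [pvOList_shift]
  cases o <;> rfl

theorem pvOList_perm {l₁ l₂ : List (Option Int)} (h : l₁.Perm l₂) : pvOList l₁ = pvOList l₂ :=
  List.Perm.foldl_eq (rcomm := ⟨fun a b c => pvOMin_rc a b c⟩) h none

theorem pvOList_map_oMin {γ : Type} (f g : γ → Option Int) (xs : List γ) :
    pvOList (xs.map fun x => pvOMin (f x) (g x)) =
      pvOMin (pvOList (xs.map f)) (pvOList (xs.map g)) := by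
  induction xs with
  | nil => rfl
  | cons x xs ih => simp only [List.map_cons, pvOList_cons, ih, pvOMin_four]

-- min of a list of ints, as an option
def pvMinL (xs : List Int) : Option Int := pvOList (xs.map some)

theorem pvMinL_cons (x : Int) (xs : List Int) : pvMinL (x :: xs) = pvOMin (some x) (pvMinL xs) := by
  simp only [pvMinL, List.map_cons, pvOList_cons]

theorem pvFoldlMin_shift (t : List Int) : ∀ x y : Int, min x (t.foldl min y) = t.foldl min (min x y) := by
  induction t with
  | nil => intro x y; simp
  | cons z t ih =>
    intro x y
    simp only [List.foldl_cons]
    rw [ih x (min y z), ← min_assoc]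

theorem pvMinL_foldl (t : List Int) : ∀ x : Int, pvMinL (x :: t) = some (List.foldl min x t) := by
  induction t with
  | nil => intro x; rfl
  | cons y t ih =>
    intro x
    rw [pvMinL_cons, ih y]
    simp only [pvOMin, List.foldl_cons]
    rw [pvFoldlMin_shift]

theorem pvMinL_eq_none_iff (xs : List Int) : pvMinL xs = none ↔ xs = [] := by
  cases xs with
  | nil => simp [pvMinL, pvOList]
  | cons x t => simp [pvMinL_foldl]

theorem pvMinNE_spec (xs : List Int) (h : xs ≠ []) : pvMinL xs = some (pvMinNE xs) := by
  cases xs with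
  | nil => exact absurd rfl h
  | cons x t =>
    rw [pvMinL_foldl]
    simp [pvMinNE, PySem.List.min?_id_cons]

-- pointwise min under a map splits a pvMinL
theorem pvMinL_map_min {γ : Type} (f g : γ → Int) (xs : List γ) :
    pvMinL (xs.map fun x => min (f x) (g x)) =
      pvOMin (pvMinL (xs.map fun x => f x)) (pvMinL (xs.map fun x => g x)) := by
  simp only [pvMinL, List.map_map]
  have hf : (some ∘ fun x => min (f x) (g x) : γ → Option Int)
      = fun x => pvOMin (some (f x)) (some (g x)) := by funext x; rfl
  rw [hf]
  rw [show (some ∘ fun x => f x : γ → Option Int) = fun x => some (f x) from rfl,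
      show (some ∘ fun x => g x : γ → Option Int) = fun x => some (g x) from rfl]
  exact pvOList_map_oMin _ _ xs

-- the candidate value A accumulates for a pair (both cases of the inner loop body at once)
def pvCand (l w : Int × Int) : Int :=
  min (max (l.1 + l.2) w.1 + w.2) (max (w.1 + w.2) l.1 + l.2)

theorem pvStep_eq (l w : Int × Int) (a : Option Int) :
    pvMinI (pvMinI a (max (l.1 + l.2) w.1 + w.2)) (max (w.1 + w.2) l.1 + l.2)
      = pvOMin a (some (pvCand l w)) := by
  cases a <;> simp [pvMinI, pvOMin, pvCand, min_assoc]

theorem pvMapGetD_range_zip (xs : List Int) : ∀ ys : List Int, xs.length ≤ ys.length →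
    (List.range xs.length).map (fun k => (xs.getD k 0, ys.getD k 0)) = xs.zip ys := by
  induction xs with
  | nil => intro ys _; simp
  | cons x xs ih =>
    intro ys h
    cases ys with
    | nil => simp at h
    | cons y ys =>
      simp only [List.length_cons, List.range_succ_eq_map, List.map_cons, List.map_map,
        List.zip_cons_cons, List.getD_cons_zero]
      refine congrArg _ ?_
      rw [← ih ys (by simpa using h)]
      rfl

-- the range loop building the pair list is zip (under Pre_: duration at least as long)
theorem pvBuild_eq_zip (xs ys : List Int) (h : xs.length ≤ ys.length) :
    (PySem.List.pyRange 0 (PySem.List.len xs) 1).foldl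
      (fun acc i => acc ++ [(PySem.List.pyGetD xs i 0, PySem.List.pyGetD ys i 0)]) []
      = xs.zip ys := by
  rw [PySem.List.foldl_append_singleton_eq_map]
  simp only [List.nil_append, PySem.List.len_eq, PySem.List.pyRange_one, List.map_map]
  rw [show ((xs.length : Int) - 0).toNat = xs.length by omega]
  rw [← pvMapGetD_range_zip xs ys h]
  refine List.map_congr_left ?_
  intro k _
  simp [PySem.List.pyGetD_natCast]

-- collapsing the inner minimum when the varying part is the OUTER element (case 2)
theorem pvInner2 (W : List (Int × Int)) : ∀ e : Int,
    pvMinL (W.map fun w => w.1 + w.2) = some e →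
    ∀ c d : Int, pvMinL (W.map fun w => max (w.1 + w.2) c + d) = some (max e c + d) := by
  induction W with
  | nil => intro e he; simp [pvMinL, pvOList] at he
  | cons w W ih =>
    intro e he c d
    simp only [List.map_cons, pvMinL_cons] at he ⊢
    rcases hW : pvMinL (W.map fun w => w.1 + w.2) with _ | e'
    · have hW0 : W = [] := by simpa using (pvMinL_eq_none_iff _).mp hW
      subst hW0
      have he' : w.1 + w.2 = e := by simpa [pvMinL, pvOList, pvOMin] using he
      simp [pvMinL, pvOList, pvOMin, ← he']
    · rw [hW] at he
      rw [ih e' hW c d]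
      simp [pvOMin] at he ⊢
      omega

-- collapsing the outer minimum when the varying part is a max bound (case 1)
theorem pvMain1 (W : List (Int × Int)) (L : List (Int × Int)) : ∀ e : Int,
    pvMinL (L.map fun p => p.1 + p.2) = some e →
    pvOList (L.map fun l => pvMinL (W.map fun w => max (l.1 + l.2) w.1 + w.2))
      = pvMinL (W.map fun w => max e w.1 + w.2) := by
  induction L with
  | nil => intro e he; simp [pvMinL, pvOList] at he
  | cons l L ih =>
    intro e he
    simp only [List.map_cons, pvMinL_cons, pvOList_cons] at he ⊢
    rcases hL : pvMinL (L.map fun p => p.1 + p.2) with _ | e'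
    · have : L = [] := by simpa using (pvMinL_eq_none_iff _).mp hL
      subst this
      rw [hL] at he
      simp only [pvOMin] at he
      cases he
      simp [pvOList, pvOMin_none_right]
    · rw [hL] at he
      simp only [pvOMin] at he
      cases he
      rw [ih e' hL]
      rw [← pvMinL_map_min (fun w => max (l.1 + l.2) w.1 + w.2) (fun w => max e' w.1 + w.2) W]
      refine congrArg _ ?_
      refine List.map_congr_left ?_
      intro w _
      omega

theorem pvZip_ne_nil (xs ys : List Int) (hx : xs ≠ []) (h : xs.length ≤ ys.length) :
    xs.zip ys ≠ [] := by
  have : (xs.zip ys).length = min xs.length ys.length := List.length_zip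
  intro hz
  rw [hz] at this
  simp at this
  have : xs.length = 0 := by omega
  exact hx (List.eq_nil_of_length_eq_zero this)

-- ===== VERDICT (by name: the statement is the Claim_ definition above) =====
set_option maxHeartbeats 1000000 in
theorem earliestFinishTime_spec : Claim_equal_earliestFinishTime := by
  intro ls ld ws wd _ hpre
  obtain ⟨hls, hws, hlen1, hlen2⟩ := hpre
  unfold Spec_earliestFinishTime earliestFinishTime earliestFinishTime_alt
  simp only [pvBuild_eq_zip ls ld hlen1, pvBuild_eq_zip ws wd hlen2]
  set L := ls.zip ld with hLdef
  set W := ws.zip wd with hWdef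
  have hLne : L ≠ [] := pvZip_ne_nil ls ld hls hlen1
  have hWne : W ≠ [] := pvZip_ne_nil ws wd hws hlen2
  set landS := PySem.List.sorted L (fun x => x.1) false with hlandS
  set waterS := PySem.List.sorted W (fun x => x.1) false with hwaterS
  set landEnd := pvMinNE (L.map fun p => p.1 + p.2) with hlandEnd
  set waterEnd := pvMinNE (W.map fun p => p.1 + p.2) with hwaterEnd
  have hLmapne : L.map (fun p => p.1 + p.2) ≠ [] := by simpa using hLne
  have hWmapne : W.map (fun p => p.1 + p.2) ≠ [] := by simpa using hWne
  have hLmin : pvMinL (L.map fun p => p.1 + p.2) = some landEnd := pvMinNE_spec _ hLmapne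
  have hWmin : pvMinL (W.map fun p => p.1 + p.2) = some waterEnd := pvMinNE_spec _ hWmapne
  -- the inner loop is a running option-min over the candidate values
  have hinner : ∀ (l : Int × Int) (a : Option Int),
      waterS.foldl (fun ans w =>
        pvMinI (pvMinI ans (max (l.1 + l.2) w.1 + w.2)) (max (w.1 + w.2) l.1 + l.2)) a
        = pvOMin a (pvMinL (waterS.map fun w => pvCand l w)) := by
    intro l a
    have hfun : (fun (ans : Option Int) (w : Int × Int) =>
        pvMinI (pvMinI ans (max (l.1 + l.2) w.1 + w.2)) (max (w.1 + w.2) l.1 + l.2))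
        = fun ans w => pvOMin ans (some (pvCand l w)) := by
      funext ans w; exact pvStep_eq l w ans
    rw [hfun]
    rw [show waterS.foldl (fun ans w => pvOMin ans (some (pvCand l w))) a
        = (waterS.map fun w => some (pvCand l w)).foldl pvOMin a from (List.foldl_map).symm]
    rw [pvOList_shift]
    simp only [pvMinL, List.map_map]
    rfl
  -- the double loop, as an option-min over the unsorted zip lists
  have houter : (landS.foldl (fun ans l => waterS.foldl (fun ans w =>
        pvMinI (pvMinI ans (max (l.1 + l.2) w.1 + w.2)) (max (w.1 + w.2) l.1 + l.2)) ans) none)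
      = pvOList (L.map fun l => pvMinL (W.map fun w => pvCand l w)) := by
    have h1 : (landS.foldl (fun ans l => waterS.foldl (fun ans w =>
          pvMinI (pvMinI ans (max (l.1 + l.2) w.1 + w.2)) (max (w.1 + w.2) l.1 + l.2)) ans) none)
        = (landS.map fun l => pvMinL (waterS.map fun w => pvCand l w)).foldl pvOMin none := by
      rw [List.foldl_map]
      refine List.foldl_ext _ _ none ?_
      intro a l _
      exact hinner l a
    rw [h1]
    have h2 : (fun l => pvMinL (waterS.map fun w => pvCand l w))
        = fun l => pvMinL (W.map fun w => pvCand l w) := by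
      funext l
      exact pvOList_perm (((PySem.List.sorted_perm W _ _).map _).map _)
    rw [show ((landS.map fun l => pvMinL (waterS.map fun w => pvCand l w)).foldl pvOMin none)
        = pvOList (landS.map fun l => pvMinL (waterS.map fun w => pvCand l w)) from rfl]
    rw [h2]
    exact pvOList_perm ((PySem.List.sorted_perm L _ _).map _)
  rw [houter]
  -- split the candidate minimum into the two plan families
  have hsplit : pvOList (L.map fun l => pvMinL (W.map fun w => pvCand l w))
      = pvOMin (pvOList (L.map fun l => pvMinL (W.map fun w => max (l.1 + l.2) w.1 + w.2)))
               (pvOList (L.map fun l => pvMinL (W.map fun w => max (w.1 + w.2) l.1 + l.2))) := by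
    have h3 : (fun l => pvMinL (W.map fun w => pvCand l w))
        = fun l => pvOMin (pvMinL (W.map fun w => max (l.1 + l.2) w.1 + w.2))
                          (pvMinL (W.map fun w => max (w.1 + w.2) l.1 + l.2)) := by
      funext l
      exact pvMinL_map_min (fun w => max (l.1 + l.2) w.1 + w.2)
        (fun w => max (w.1 + w.2) l.1 + l.2) W
    rw [h3]
    exact pvOList_map_oMin _ _ L
  rw [hsplit]
  -- land-then-water family: collapses to the minimal land end time
  have hterm1 : pvOList (L.map fun l => pvMinL (W.map fun w => max (l.1 + l.2) w.1 + w.2))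
      = some (pvMinNE (W.map fun p => max landEnd p.1 + p.2)) := by
    rw [pvMain1 W L landEnd hLmin]
    exact pvMinNE_spec _ (by simpa using hWne)
  -- water-then-land family: each inner minimum collapses to the minimal water end time
  have hterm2 : pvOList (L.map fun l => pvMinL (W.map fun w => max (w.1 + w.2) l.1 + l.2))
      = some (pvMinNE (L.map fun p => max waterEnd p.1 + p.2)) := by
    have h4 : (L.map fun l => pvMinL (W.map fun w => max (w.1 + w.2) l.1 + l.2))
        = L.map fun l => some (max waterEnd l.1 + l.2) := by
      refine List.map_congr_left ?_
      intro l _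
      exact pvInner2 W waterEnd hWmin l.1 l.2
    rw [h4]
    rw [show pvOList (L.map fun l => some (max waterEnd l.1 + l.2))
        = pvMinL (L.map fun l => max waterEnd l.1 + l.2) from by
      simp only [pvMinL, List.map_map]; rfl]
    exact pvMinNE_spec _ (by simpa using hLne)
  rw [hterm1, hterm2]
  simp [pvOMin]
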